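-- pv_equiv track=rewrite | github.com/gsetant/NeteaseCloudMusic | main.py | get_highest_result
-- ===== SOURCE A (Python) =====
-- def get_highest_result(results):
--     highest_result = None
--     score = 0
--     for result in results:
--         if result.get('score') > score:
--             highest_result = result
--             score = result.get('score')
--     return highest_result
-- ===== SOURCE B (Python) =====
-- def get_highest_result(results):
--     ranked = sorted((r for r in results if r.get('score') > 0),
--                     key=lambda r: r.get('score'), reverse=True)
--     return ranked[0] if ranked else None
-- ===== Notes on version B (the rewrite author's own statement) =====
-- stated objective: alternative
-- what changed: Replaces the single-pass running-max accumulator with a sort-then-pick: stably sort the positive-score results descending by score and return the first element (stable reverse sort puts the first maximal element in front, matching A's strict-greater tie behaviour), or None if no candidate remains.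
import Mathlib
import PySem

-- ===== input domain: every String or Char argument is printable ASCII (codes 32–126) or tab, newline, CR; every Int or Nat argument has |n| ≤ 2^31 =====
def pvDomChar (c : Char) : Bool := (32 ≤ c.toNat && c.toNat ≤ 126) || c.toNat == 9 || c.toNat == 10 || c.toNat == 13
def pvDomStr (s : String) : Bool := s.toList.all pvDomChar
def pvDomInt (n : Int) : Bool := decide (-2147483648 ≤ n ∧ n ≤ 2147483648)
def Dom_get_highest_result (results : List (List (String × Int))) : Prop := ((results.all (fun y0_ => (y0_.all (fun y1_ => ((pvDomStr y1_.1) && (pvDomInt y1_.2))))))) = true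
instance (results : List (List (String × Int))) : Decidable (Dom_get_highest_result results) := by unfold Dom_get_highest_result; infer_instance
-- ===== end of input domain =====

-- B replaces A's running-max scan by sort-then-pick: stably sort the positive-score results
-- descending by score and take the first element (objective: alternative; B sorts, A scans).

-- ===== PORT A =====
-- A's loop: state (highest_result, score), update on strict '>'; the 'none' branch of the
-- lookup (Python: None > int raises TypeError) is unreachable under Pre_ and leaves the state.
def get_highest_result (results : List (List (String × Int))) : Option (List (String × Int)) :=
  (results.foldl
    (fun (st : Option (List (String × Int)) × Int) result =>
      match (PySem.Dict.mk result).get? "score" with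
      | some s => if st.2 < s then (some result, s) else st
      | none => st)
    (none, 0)).1

-- ===== PORT B =====
-- Source B's key function r.get('score'); the getD 0 totalizes the missing-key case Pre_ excludes.
def pyScore (r : List (String × Int)) : Int := ((PySem.Dict.mk r).get? "score").getD 0

-- Source B: ranked = sorted(filter, key=score, reverse=True); return ranked[0] if ranked else None
def get_highest_result_alt (results : List (List (String × Int))) : Option (List (String × Int)) :=
  (PySem.List.sorted (results.filter (fun r => 0 < pyScore r)) pyScore true).head?

-- ===== PRECONDITION & SPEC =====
-- Pre_ excludes exactly the inputs where some result lacks a 'score' key: there Python A (and B)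
-- raise TypeError comparing None with an int.
def Pre_get_highest_result (results : List (List (String × Int))) : Prop :=
  ∀ r ∈ results, ((PySem.Dict.mk r).get? "score").isSome = true
instance (results : List (List (String × Int))) : Decidable (Pre_get_highest_result results) := by unfold Pre_get_highest_result; infer_instance

def pvWitness_get_highest_result : (List (List (String × Int))) := [[("score", 3)], [("score", 1)]]

def Spec_get_highest_result (results : List (List (String × Int))) (out : Option (List (String × Int))) : Prop := out = get_highest_result_alt results
instance (results : List (List (String × Int))) (out : Option (List (String × Int))) : Decidable (Spec_get_highest_result results out) := by unfold Spec_get_highest_result; infer_instance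

-- ===== CLAIM (what is proved, stated in full; the proofs are below) =====
def Claim_equal_get_highest_result : Prop := ∀ (results : List (List (String × Int))), Dom_get_highest_result results → Pre_get_highest_result results → Spec_get_highest_result results (get_highest_result results)

-- ===== LEMMAS AND PROOFS =====

-- the step of a running first-max (the fold inside PySem.List.max?)
def maxStep (acc : Option (List (String × Int))) (x : List (String × Int)) : Option (List (String × Int)) :=
  match acc with
  | none => some x
  | some m => if pyScore m < pyScore x then some x else some m

-- the head of a descending stable insertion updates exactly like the first-max step
theorem head?_insertBy (x : List (String × Int)) (acc : List (List (String × Int))) :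
    (PySem.List.insertBy (fun a b => decide (pyScore b < pyScore a)) x acc).head? =
      maxStep acc.head? x := by
  cases acc with
  | nil => rfl
  | cons y ys =>
    unfold PySem.List.insertBy maxStep
    by_cases h : pyScore y < pyScore x <;> simp [h]

-- head of the insertion-sort fold = first-max fold of the heads
theorem head?_foldl_insertBy (l : List (List (String × Int))) (acc : List (List (String × Int))) :
    ((l.foldl (fun acc x => PySem.List.insertBy (fun a b => decide (pyScore b < pyScore a)) x acc) acc).head?) =
      l.foldl maxStep acc.head? := by
  induction l generalizing acc with
  | nil => rfl
  | cons x t ih => simp only [List.foldl_cons, ih, head?_insertBy]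

-- head of the reverse stable sort is the FIRST maximal element (A's strict-'>' loop answer)
theorem head?_sorted_rev (xs : List (List (String × Int))) :
    (PySem.List.sorted xs pyScore true).head? = xs.foldl maxStep none := by
  rw [PySem.List.sorted_rev_eq_foldl_insertBy, head?_foldl_insertBy]
  rfl

-- the two accumulators kept in sync: A's state is (acc, score of acc / 0)
def toState (acc : Option (List (String × Int))) : Option (List (String × Int)) × Int :=
  match acc with
  | none => (none, 0)
  | some m => (some m, pyScore m)

theorem loop_agree (l : List (List (String × Int)))
    (hpre : ∀ r ∈ l, ((PySem.Dict.mk r).get? "score").isSome = true)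
    (acc : Option (List (String × Int)))
    (hinv : ∀ m, acc = some m → 0 < pyScore m) :
    (l.foldl
      (fun (st : Option (List (String × Int)) × Int) result =>
        match (PySem.Dict.mk result).get? "score" with
        | some s => if st.2 < s then (some result, s) else st
        | none => st)
      (toState acc)).1
      = (l.filter (fun r => 0 < pyScore r)).foldl maxStep acc := by
  induction l generalizing acc with
  | nil =>
    cases acc <;> simp [toState]
  | cons x t ih =>
    have hx : ((PySem.Dict.mk x).get? "score").isSome = true := hpre x (by simp)
    obtain ⟨s, hs⟩ := Option.isSome_iff_exists.mp hx
    have hkey : pyScore x = s := by simp [pyScore, hs]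
    have hxs : (some x, s) = toState (some x) := by simp [toState, hkey]
    have hpre' : ∀ r ∈ t, ((PySem.Dict.mk r).get? "score").isSome = true :=
      fun r hr => hpre r (by simp [hr])
    simp only [List.foldl_cons, List.filter_cons, hs]
    cases acc with
    | none =>
      simp only [toState]
      by_cases hp : 0 < pyScore x
      · have hp' : (0 : Int) < s := hkey ▸ hp
        rw [if_pos hp', hxs, ih hpre' (some x) (by intro m hm; cases hm; exact hp)]
        simp [hp, maxStep]
      · have hp' : ¬ (0 : Int) < s := hkey ▸ hp
        rw [if_neg hp']
        have := ih hpre' none (by intro m hm; cases hm)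
        simp only [toState] at this
        rw [this]
        simp [hp]
    | some m =>
      have hm0 : 0 < pyScore m := hinv m rfl
      simp only [toState]
      by_cases hlt : pyScore m < s
      · have hpx : 0 < pyScore x := by rw [hkey]; omega
        rw [if_pos hlt, hxs, ih hpre' (some x) (by intro m' hm'; cases hm'; exact hpx)]
        simp only [hpx, decide_true, if_true, List.foldl_cons]
        have : maxStep (some m) x = some x := by
          simp [maxStep, hkey, hlt]
        rw [this]
      · rw [if_neg hlt]
        have heq := ih hpre' (some m) (by intro m' hm'; cases hm'; exact hm0)
        simp only [toState] at heq
        rw [heq]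
        by_cases hpx : 0 < pyScore x
        · simp only [hpx, decide_true, if_true, List.foldl_cons]
          have : maxStep (some m) x = some m := by
            simp [maxStep, hkey, hlt]
          rw [this]
        · simp [hpx]

-- ===== VERDICT (by name: the statement is the Claim_ definition above) =====
theorem get_highest_result_spec : Claim_equal_get_highest_result := by
  intro results _ hpre
  unfold Spec_get_highest_result get_highest_result get_highest_result_alt
  rw [head?_sorted_rev]
  exact loop_agree results hpre none (by intro m hm; cases hm)
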